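-- pv_equiv track=rewrite | github.com/qwas15788hj/LeetCode | 2057-smallest-index-with-equal-value/2057-smallest-index-with-equal-value.py | smallestEqual
-- ===== SOURCE A (Python) =====
-- def smallestEqual(nums):
--     answer = []
--     for i in range(len(nums)):
--         if i%10 == nums[i]:
--             answer.append(i)
--     if len(answer) == 0:
--         return -1
--     else:
--         return min(answer)
-- ===== SOURCE B (Python) =====
-- def smallestEqual(nums):
--     for i in range(len(nums)):
--         if i % 10 == nums[i]:
--             return i
--     return -1
-- ===== Notes on version B (the rewrite author's own statement) =====
-- stated objective: simpler
-- what changed: Replaced collect-all-matches-into-a-list-then-min() with a single short-circuiting scan that returns the first (hence smallest) matching index immediately.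
import Mathlib
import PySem

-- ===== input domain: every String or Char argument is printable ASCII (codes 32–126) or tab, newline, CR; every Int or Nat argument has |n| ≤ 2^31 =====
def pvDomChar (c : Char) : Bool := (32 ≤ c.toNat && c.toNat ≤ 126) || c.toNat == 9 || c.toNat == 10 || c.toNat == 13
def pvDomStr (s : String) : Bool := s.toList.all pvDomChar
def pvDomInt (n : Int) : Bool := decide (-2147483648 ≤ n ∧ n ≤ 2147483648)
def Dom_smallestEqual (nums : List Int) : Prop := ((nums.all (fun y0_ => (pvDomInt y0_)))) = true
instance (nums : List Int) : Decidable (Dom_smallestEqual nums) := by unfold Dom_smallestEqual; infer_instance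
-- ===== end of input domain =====

-- B replaces A's collect-all-then-min() with a single early-return scan (simpler).

-- ===== PORT A =====
-- the index i from range(len(nums)) is always in range, so pyGetD with default 0 is exact here
def smallestEqual (nums : List Int) : Int :=
  let answer := (PySem.List.pyRange 0 nums.length 1).foldl
    (fun acc i =>
      if PySem.Int.mod i 10 == PySem.List.pyGetD nums i 0 then acc ++ [i] else acc) []
  if answer.length = 0 then -1
  else match PySem.List.min? answer (fun x => x) with
       | some m => m
       | none => -1   -- unreachable: answer nonempty

-- ===== PORT B =====
-- the 'for i in range(len(nums)): … return i' loop as structural recursion carrying the index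
def smallestEqualGo (i : Int) (l : List Int) : Int :=
  match l with
  | [] => -1
  | x :: t => if PySem.Int.mod i 10 == x then i else smallestEqualGo (i + 1) t

def smallestEqual_alt (nums : List Int) : Int := smallestEqualGo 0 nums

-- ===== PRECONDITION & SPEC =====
def Spec_smallestEqual (nums : List Int) (out : Int) : Prop := out = smallestEqual_alt nums
instance (nums : List Int) (out : Int) : Decidable (Spec_smallestEqual nums out) := by unfold Spec_smallestEqual; infer_instance

-- ===== CLAIM (what is proved, stated in full; the proofs are below) =====
def Claim_equal_smallestEqual : Prop := ∀ (nums : List Int), Dom_smallestEqual nums → Spec_smallestEqual nums (smallestEqual nums)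

-- ===== LEMMAS AND PROOFS =====

theorem pv_foldl_min_of_le (t : List Int) (x : Int) (h : ∀ y ∈ t, x ≤ y) :
    t.foldl min x = x := by
  induction t generalizing x with
  | nil => rfl
  | cons y t ih =>
      simp only [List.foldl_cons]
      have hxy : min x y = x := min_eq_left (h y (by simp))
      rw [hxy]
      exact ih x (fun z hz => h z (by simp [hz]))

theorem pv_min_of_sorted (L : List Int) (h : L.Pairwise (· < ·)) :
    (match PySem.List.min? L (fun x => x) with
     | some m => m
     | none => -1) = L.headD (-1) := by
  cases L with
  | nil => simp [PySem.List.min?]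
  | cons x t =>
      rw [PySem.List.min?_id_cons]
      have : t.foldl min x = x :=
        pv_foldl_min_of_le t x (fun y hy => le_of_lt ((List.pairwise_cons.mp h).1 y hy))
      simp [this]

-- B's recursion returns the head of the matching indices of the enumerated list
theorem pv_go_eq (l : List Int) (s : Int) :
    smallestEqualGo s l =
      (((PySem.List.enumerate l s).filter
          (fun q => PySem.Int.mod q.1 10 == q.2)).map (·.1)).headD (-1) := by
  induction l generalizing s with
  | nil => simp [smallestEqualGo, PySem.List.enumerate_nil]
  | cons x t ih =>
      rw [PySem.List.enumerate_cons]
      simp only [smallestEqualGo, List.filter_cons]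
      by_cases h : (s % 10 : Int) = x
      · simp [h]
      · simp [h, ih (s + 1)]

-- A's answer list is the matching indices of the enumerated list
theorem pv_answer_eq (nums : List Int) :
    (PySem.List.pyRange 0 nums.length 1).foldl
      (fun acc i =>
        if PySem.Int.mod i 10 == PySem.List.pyGetD nums i 0 then acc ++ [i] else acc) []
    = ((PySem.List.enumerate nums 0).filter
        (fun q => PySem.Int.mod q.1 10 == q.2)).map (·.1) := by
  rw [PySem.List.foldl_append_if_eq_filter]
  rw [PySem.List.enumerate_eq_map_pyRange nums 0]
  rw [List.filter_map, List.map_map]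
  simp [Function.comp_def]

-- ===== VERDICT (by name: the statement is the Claim_ definition above) =====
theorem smallestEqual_spec : Claim_equal_smallestEqual := by
  intro nums _
  unfold Spec_smallestEqual smallestEqual smallestEqual_alt
  rw [pv_go_eq nums 0]
  simp only [pv_answer_eq nums]
  set L := ((PySem.List.enumerate nums 0).filter
      (fun q => PySem.Int.mod q.1 10 == q.2)).map (·.1) with hL
  have hpw : L.Pairwise (· < ·) := by
    rw [hL]
    exact (List.pairwise_map).mpr
      ((PySem.List.pairwise_lt_enumerate nums 0).filter _)
  by_cases h0 : L.length = 0
  · rw [List.length_eq_zero_iff] at h0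
    simp [h0]
  · rw [if_neg h0, pv_min_of_sorted L hpw]
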